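-- pv_equiv track=rewrite | github.com/guojunximi-cell/Voice-Gender-Analyzer | voiceya/sidecars/visualizer-backend/tools/_corpus_common.py | round_robin_select
-- ===== SOURCE A (Python) =====
-- def round_robin_select(by_speaker: dict[str, list], cap_per_speaker: int) -> list:
-- 	"""Round-robin pick up to ``cap_per_speaker`` items from each speaker bucket.
--
-- 	Yields items interleaved by speaker so partial runs are still gender-/spk-
-- 	balanced. ``by_speaker`` must already be ordered (a list per speaker).
-- 	"""
-- 	picked = []
-- 	pools = {s: list(items) for s, items in by_speaker.items()}
-- 	pools = {s: items for s, items in pools.items() if items}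
-- 	while pools:
-- 		empty = []
-- 		for spk in list(pools.keys()):
-- 			items = pools[spk]
-- 			if not items:
-- 				empty.append(spk)
-- 				continue
-- 			# stop pulling from a speaker that's already at cap
-- 			if cap_per_speaker > 0:
-- 				taken_from_spk = sum(1 for p in picked if p[0] == spk)
-- 				if taken_from_spk >= cap_per_speaker:
-- 					empty.append(spk)
-- 					continue
-- 			picked.append((spk, items.pop(0)))
-- 		for spk in empty:
-- 			pools.pop(spk, None)
-- 	return picked
-- ===== SOURCE B (Python) =====
-- def round_robin_select(by_speaker: dict[str, list], cap_per_speaker: int) -> list: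
-- 	"""Round-robin pick up to ``cap_per_speaker`` items from each speaker bucket.
--
-- 	One pass computes each speaker's quota (len, or min(len, cap)); the picks of
-- 	round r are then exactly the r-th items of the speakers whose quota exceeds r,
-- 	in bucket order, so the output is built by direct indexing with no rescans.
-- 	"""
-- 	quotas = []
-- 	rounds = 0
-- 	for s, items in by_speaker.items():
-- 		n = len(items)
-- 		q = n if cap_per_speaker <= 0 else min(n, cap_per_speaker)
-- 		quotas.append((s, items, q))
-- 		if q > rounds:
-- 			rounds = q
-- 	picked = []
-- 	for r in range(rounds):
-- 		for s, items, q in quotas: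
-- 			if r < q:
-- 				picked.append((s, items[r]))
-- 	return picked
-- ===== Notes on version B (the rewrite author's own statement) =====
-- stated objective: faster
-- what changed: A's while-loop rescans all of `picked` to recount each speaker's takes and does pop(0) on each bucket every round; B computes each speaker's quota (min(len, cap)) in one pass and then emits round r as the r-th items of the buckets whose quota exceeds r, by direct indexing with no rescans.
import Mathlib
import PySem

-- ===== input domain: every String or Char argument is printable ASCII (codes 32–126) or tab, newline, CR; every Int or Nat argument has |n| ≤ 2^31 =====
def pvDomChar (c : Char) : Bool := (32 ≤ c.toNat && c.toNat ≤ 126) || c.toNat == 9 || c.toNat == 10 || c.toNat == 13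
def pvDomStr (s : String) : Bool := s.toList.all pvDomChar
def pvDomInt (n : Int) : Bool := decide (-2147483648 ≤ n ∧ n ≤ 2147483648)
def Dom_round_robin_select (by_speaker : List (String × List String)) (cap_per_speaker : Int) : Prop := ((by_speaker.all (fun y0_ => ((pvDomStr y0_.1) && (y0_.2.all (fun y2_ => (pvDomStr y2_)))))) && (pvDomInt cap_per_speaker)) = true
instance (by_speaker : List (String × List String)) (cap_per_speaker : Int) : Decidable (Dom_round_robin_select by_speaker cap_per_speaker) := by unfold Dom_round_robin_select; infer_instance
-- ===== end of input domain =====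

-- B replaces A's quadratic while-loop (which recounts `picked` per speaker and pops
-- the front of each bucket every round) by one pass computing per-speaker quotas
-- followed by direct indexing per round; one-line objective: a faster algorithm.

-- ===== PORT A =====
-- body of `for spk in list(pools.keys())`: state = (picked, pools, empty)
def pvStepA (cap : Int) (st : List (String × String) × PySem.Dict String (List String) × List String)
    (spk : String) : List (String × String) × PySem.Dict String (List String) × List String :=
  match st.2.1.getD spk [] with      -- items = pools[spk]; spk is always a key of pools here
  | [] => (st.1, st.2.1, st.2.2 ++ [spk])
  | x :: rest =>
      -- `taken_from_spk = sum(1 for p in picked if p[0] == spk)`, compared only when cap > 0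
      if cap > 0 ∧ cap ≤ (st.1.countP (fun p => p.1 == spk) : Int) then
        (st.1, st.2.1, st.2.2 ++ [spk])
      else
        (st.1 ++ [(spk, x)], st.2.1.insert spk rest, st.2.2)   -- items.pop(0) mutates the bucket in place

-- the `while pools:` loop; the fuel argument only makes the recursion structural,
-- and the initial fuel passed below is proved sufficient (pvFuelBig + pvLoopA_eq)
def pvLoopA (cap : Int) : Nat → List (String × String) → PySem.Dict String (List String) → List (String × String)
  | 0, picked, _ => picked
  | fuel+1, picked, pools =>
      if pools.items.isEmpty then picked
      else
        let st := pools.keys.foldl (pvStepA cap) (picked, pools, [])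
        pvLoopA cap fuel st.1 (st.2.2.foldl (fun d s => d.erase s) st.2.1)

def round_robin_select (by_speaker : List (String × List String)) (cap_per_speaker : Int) : List (String × String) :=
  let pools0 := PySem.Dict.ofList by_speaker                                      -- {s: list(items) for s, items in by_speaker.items()}
  let pools := PySem.Dict.ofList (pools0.items.filter (fun p => !p.2.isEmpty))    -- {s: items for s, items in pools.items() if items}
  pvLoopA cap_per_speaker (pools.items.foldl (fun n p => n + p.2.length) 0 + pools.size + 1) [] pools

-- ===== PORT B =====
def round_robin_select_alt (by_speaker : List (String × List String)) (cap_per_speaker : Int) : List (String × String) :=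
  -- first pass: quotas = [(s, items, q)] and rounds = max quota
  let st := (PySem.Dict.ofList by_speaker).items.foldl
      (fun (acc : List (String × List String × Int) × Int) p =>
        let n : Int := p.2.length
        let q : Int := if cap_per_speaker ≤ 0 then n else min n cap_per_speaker
        (acc.1 ++ [(p.1, p.2, q)], if q > acc.2 then q else acc.2)) ([], 0)
  -- second pass: for r in range(rounds): pick items[r] from every bucket with r < q
  (PySem.List.pyRange 0 st.2 1).foldl (fun picked r =>
      st.1.foldl (fun picked t =>
        if r < t.2.2 then picked ++ [(t.1, PySem.List.pyGetD t.2.1 r "")] else picked) picked) []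

-- ===== PRECONDITION & SPEC =====
def Spec_round_robin_select (by_speaker : List (String × List String)) (cap_per_speaker : Int) (out : List (String × String)) : Prop := out = round_robin_select_alt by_speaker cap_per_speaker
instance (by_speaker : List (String × List String)) (cap_per_speaker : Int) (out : List (String × String)) : Decidable (Spec_round_robin_select by_speaker cap_per_speaker out) := by unfold Spec_round_robin_select; infer_instance

-- ===== CLAIM (what is proved, stated in full; the proofs are below) =====
def Claim_equal_round_robin_select : Prop := ∀ (by_speaker : List (String × List String)) (cap_per_speaker : Int), Dom_round_robin_select by_speaker cap_per_speaker → Spec_round_robin_select by_speaker cap_per_speaker (round_robin_select by_speaker cap_per_speaker)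

-- ===== LEMMAS AND PROOFS =====

-- the (Nat) quota of a bucket: how many items A ends up taking from it
def pvQ (cap : Int) (p : String × List String) : Nat :=
  if cap ≤ 0 then p.2.length else min p.2.length cap.toNat

-- the picks of round r, in bucket order
def pvRow (cap : Int) (Q : List (String × List String)) (r : Nat) : List (String × String) :=
  (Q.filter (fun p => decide (r < pvQ cap p))).map (fun p => (p.1, p.2.getD r ""))

-- the number of rounds = the largest quota
def pvR (cap : Int) (Q : List (String × List String)) : Nat :=
  (Q.map (pvQ cap)).foldl max 0

-- A's pool dict at the start of round r
def pvPools (cap : Int) (Q : List (String × List String)) (r : Nat) : PySem.Dict String (List String) :=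
  ⟨(Q.filter (fun p => decide (max r 1 ≤ pvQ cap p))).map (fun p => (p.1, p.2.drop r))⟩

-- effect of round r on one bucket of the pool dict
def pvG (cap : Int) (r : Nat) (p : String × List String) : String × List String :=
  if r < pvQ cap p then (p.1, p.2.drop (r+1)) else (p.1, p.2.drop r)

lemma pvQ_le (cap : Int) (p : String × List String) : pvQ cap p ≤ p.2.length := by
  unfold pvQ; split <;> omega

lemma pvG_fst (cap : Int) (r : Nat) (p : String × List String) : (pvG cap r p).1 = p.1 := by
  unfold pvG; split <;> rfl

lemma pvQ_le_R (cap : Int) {Q : List (String × List String)} {p : String × List String}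
    (hp : p ∈ Q) : pvQ cap p ≤ pvR cap Q :=
  (PySem.List.le_foldl_max (Q.map (pvQ cap)) 0).2 _ (List.mem_map_of_mem hp)

lemma pvCountP_fst_filter (pred : (String × List String) → Bool) (p : String × List String) :
    ∀ Q : List (String × List String), (Q.map Prod.fst).Nodup → p ∈ Q → pred p = true →
    List.countP (fun q => q.1 == p.1) (Q.filter pred) = 1 := by
  intro Q
  induction Q with
  | nil => intro _ hp; cases hp
  | cons a Q ih =>
      intro hnd hp hpred
      simp only [List.map_cons, List.nodup_cons] at hnd
      have hzero : ∀ (l : List (String × List String)), (∀ b ∈ l, b.1 ≠ p.1) →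
          List.countP (fun q => q.1 == p.1) (l.filter pred) = 0 := by
        intro l hl
        rw [List.countP_eq_zero]
        intro b hb
        simpa using hl b (List.mem_filter.1 hb).1
      rcases List.mem_cons.1 hp with rfl | hmem
      · rw [List.filter_cons_of_pos hpred, List.countP_cons_of_pos (p := fun q : String × List String => q.1 == p.1) (by simp)]
        rw [hzero Q (by intro b hb e; exact hnd.1 (e ▸ List.mem_map_of_mem hb))]
      · have hne : a.1 ≠ p.1 := by
          intro e; exact hnd.1 (e ▸ List.mem_map_of_mem hmem)
        have := ih hnd.2 hmem hpred
        by_cases hpa : pred a = true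
        · rw [List.filter_cons_of_pos hpa, List.countP_cons_of_neg (p := fun q : String × List String => q.1 == p.1) (by simpa using hne)]
          exact this
        · rw [List.filter_cons_of_neg (by simpa using hpa)]
          exact this

lemma pvCount_row (cap : Int) {Q : List (String × List String)} (hnd : (Q.map Prod.fst).Nodup)
    {p : String × List String} (hp : p ∈ Q) (r : Nat) (hq : r < pvQ cap p) :
    (pvRow cap Q r).countP (fun z => z.1 == p.1) = 1 := by
  unfold pvRow
  rw [List.countP_map]
  exact pvCountP_fst_filter _ p Q hnd hp (by simpa using hq)


lemma pvEraseFold (ks : List String) :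
    ∀ (L : List (String × List String)),
    (ks.foldl (fun d s => d.erase s) (⟨L⟩ : PySem.Dict String (List String))).items
      = L.filter (fun p => !ks.contains p.1) := by
  induction ks with
  | nil => intro L; simp
  | cons k ks ih =>
      intro L
      simp only [List.foldl_cons]
      have : (⟨L⟩ : PySem.Dict String (List String)).erase k
          = (⟨L.filter (fun p => !(p.1 == k))⟩ : PySem.Dict String (List String)) := rfl
      rw [this, ih, List.filter_filter]
      apply List.filter_congr
      intro p _
      simp only [List.contains_cons, Bool.not_or, Bool.and_comm]


lemma pvEraseFoldD (ks : List String) (L : List (String × List String)) :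
    (ks.foldl (fun d s => d.erase s) (⟨L⟩ : PySem.Dict String (List String)))
      = (⟨L.filter (fun p => !ks.contains p.1)⟩ : PySem.Dict String (List String)) := by
  apply PySem.Dict.ext
  exact pvEraseFold ks L

lemma pvOfList_nodup_eq (L : List (String × List String)) (h : (L.map Prod.fst).Nodup) :
    PySem.Dict.ofList L = (⟨L⟩ : PySem.Dict String (List String)) := by
  apply PySem.Dict.ext
  show (List.foldl (fun acc p => acc.insert p.1 p.2) PySem.Dict.empty L).items = L
  rw [PySem.Dict.items_foldl_insert_fresh L Prod.fst Prod.snd PySem.Dict.empty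
        (by intro a _; rfl) h]
  show ([] : List (String × List String)) ++ _ = _
  simp

lemma pvPoolsInit (cap : Int) (L : List (String × List String)) (h : (L.map Prod.fst).Nodup) :
    PySem.Dict.ofList ((⟨L⟩ : PySem.Dict String (List String)).items.filter (fun p => !p.2.isEmpty))
      = pvPools cap L 0 := by
  have hsub : ((L.filter (fun p => !p.2.isEmpty)).map Prod.fst).Nodup :=
    ((List.filter_sublist (l := L)).map Prod.fst).nodup h
  show PySem.Dict.ofList (L.filter (fun p => !p.2.isEmpty)) = _
  rw [pvOfList_nodup_eq _ hsub]
  unfold pvPools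
  apply PySem.Dict.ext
  show L.filter (fun p => !p.2.isEmpty)
      = (L.filter (fun p => decide (max 0 1 ≤ pvQ cap p))).map (fun p => (p.1, p.2.drop 0))
  have : ∀ p : String × List String, (!p.2.isEmpty) = decide (max 0 1 ≤ pvQ cap p) := by
    intro p
    rcases p with ⟨s, l⟩
    cases l
    · simp [pvQ]
    · simp [pvQ]; split <;> omega
  rw [List.filter_congr (fun p _ => this p)]
  rw [show (fun p : String × List String => (p.1, p.2.drop 0)) = id from funext (fun p => by simp)]
  simp

lemma pvFoldStep (cap : Int) (r : Nat) (acc0 : List (String × String)) :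
    ∀ (todo done : List (String × List String)) (accE : List String),
    ((done ++ todo).map Prod.fst).Nodup →
    (∀ p ∈ done ++ todo, max r 1 ≤ pvQ cap p) →
    (∀ p ∈ todo, acc0.countP (fun z => z.1 == p.1) = r) →
    (todo.map Prod.fst).foldl (pvStepA cap)
      (acc0 ++ (done.filter (fun p => decide (r < pvQ cap p))).map (fun p => (p.1, p.2.getD r "")),
       ⟨done.map (pvG cap r) ++ todo.map (fun p => (p.1, p.2.drop r))⟩,
       accE ++ (done.filter (fun p => !decide (r < pvQ cap p))).map Prod.fst) =
      (acc0 ++ ((done ++ todo).filter (fun p => decide (r < pvQ cap p))).map (fun p => (p.1, p.2.getD r "")),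
       ⟨(done ++ todo).map (pvG cap r)⟩,
       accE ++ ((done ++ todo).filter (fun p => !decide (r < pvQ cap p))).map Prod.fst) := by
  intro todo
  induction todo with
  | nil => intro done accE _ _ _; simp
  | cons p rest ih =>
      intro done accE hnd hq hacc
      -- key disjointness facts
      have hnd' : ((done ++ [p] ++ rest).map Prod.fst).Nodup := by
        simpa [List.append_assoc] using hnd
      have h1 : ((done.map Prod.fst) ++ (p.1 :: rest.map Prod.fst)).Nodup := by simpa using hnd
      rw [List.nodup_append] at h1
      have hp_done : ∀ b ∈ done, b.1 ≠ p.1 := by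
        intro b hb e
        exact h1.2.2 b.1 (List.mem_map_of_mem hb) p.1 (by simp) e
      have hp_rest : p.1 ∉ rest.map Prod.fst := by
        have := h1.2.1
        rw [List.nodup_cons] at this
        exact this.1
      have hfindnone : (done.map (pvG cap r)).find? (fun z => z.1 == p.1) = none := by
        rw [List.find?_eq_none]
        intro z hz
        rcases List.mem_map.1 hz with ⟨b, hb, rfl⟩
        simpa [pvG_fst] using hp_done b hb
      have hlook : ((⟨done.map (pvG cap r) ++ (p.1, p.2.drop r) :: rest.map (fun p => (p.1, p.2.drop r))⟩ : PySem.Dict String (List String)).getD p.1 []) = p.2.drop r := by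
        simp [PySem.Dict.getD, PySem.Dict.get?, List.find?_append, hfindnone]
      simp only [List.map_cons, List.foldl_cons]
      rcases hdrop : p.2.drop r with _ | ⟨x, rest2⟩
      · -- bucket already exhausted: speaker goes to `empty`
        have hnr : ¬ r < pvQ cap p := by
          have h2 := pvQ_le cap p
          have h3 : p.2.length ≤ r := List.drop_eq_nil_iff.mp hdrop
          omega
        have hgp : pvG cap r p = (p.1, ([] : List String)) := by unfold pvG; rw [if_neg hnr, hdrop]
        rw [hdrop] at hlook
        have hstep : pvStepA cap
            (acc0 ++ (done.filter (fun p => decide (r < pvQ cap p))).map (fun p => (p.1, p.2.getD r "")),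
             ⟨done.map (pvG cap r) ++ (p.1, ([] : List String)) :: rest.map (fun p => (p.1, p.2.drop r))⟩,
             accE ++ (done.filter (fun p => !decide (r < pvQ cap p))).map Prod.fst) p.1 =
            (acc0 ++ ((done ++ [p]).filter (fun p => decide (r < pvQ cap p))).map (fun p => (p.1, p.2.getD r "")),
             ⟨(done ++ [p]).map (pvG cap r) ++ rest.map (fun p => (p.1, p.2.drop r))⟩,
             accE ++ ((done ++ [p]).filter (fun p => !decide (r < pvQ cap p))).map Prod.fst) := by
          unfold pvStepA
          simp only [hlook]
          simp [List.filter_append, hnr, hgp]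
        rw [hstep]
        have hq2 : ∀ b ∈ (done ++ [p]) ++ rest, max r 1 ≤ pvQ cap b := by
          intro b hb; apply hq; simpa [List.append_assoc] using hb
        have hres := ih (done ++ [p]) accE (by simpa [List.append_assoc] using hnd') hq2
          (fun b hb => hacc b (List.mem_cons_of_mem _ hb))
        simpa [List.append_assoc] using hres
      · -- bucket still has items: cap check, then pick or skip
        rw [hdrop] at hlook
        have hlen : r < p.2.length := by
          have := congrArg List.length hdrop
          simp at this; omega
        have hx : p.2.getD r "" = x := by
          have h0 := List.getElem?_drop (xs := p.2) (i := r) (j := 0)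
          rw [hdrop] at h0
          simp at h0
          rw [List.getD_eq_getElem?_getD, ← h0]
          rfl
        have hrest2 : p.2.drop (r+1) = rest2 := by
          have h0 := List.tail_drop (l := p.2) (i := r)
          rw [hdrop] at h0
          simpa using h0.symm
        have hc0 : (acc0 ++ (done.filter (fun p => decide (r < pvQ cap p))).map
            (fun p => (p.1, p.2.getD r ""))).countP (fun z => z.1 == p.1) = r := by
          rw [List.countP_append, hacc p (by simp), List.countP_eq_zero.mpr, Nat.add_zero]
          intro z hz
          rcases List.mem_map.1 hz with ⟨b, hb, rfl⟩
          simpa using hp_done b (List.mem_filter.1 hb).1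
        by_cases hcap : 0 < cap ∧ cap ≤ (r : Int)
        · -- speaker already at cap
          have hnr : ¬ r < pvQ cap p := by
            unfold pvQ
            rw [if_neg (by omega)]
            omega
          have hgp : pvG cap r p = (p.1, x :: rest2) := by
            unfold pvG; rw [if_neg hnr, hdrop]
          have hstep : pvStepA cap
              (acc0 ++ (done.filter (fun p => decide (r < pvQ cap p))).map (fun p => (p.1, p.2.getD r "")),
               ⟨done.map (pvG cap r) ++ (p.1, x :: rest2) :: rest.map (fun p => (p.1, p.2.drop r))⟩,
               accE ++ (done.filter (fun p => !decide (r < pvQ cap p))).map Prod.fst) p.1 =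
              (acc0 ++ ((done ++ [p]).filter (fun p => decide (r < pvQ cap p))).map (fun p => (p.1, p.2.getD r "")),
               ⟨(done ++ [p]).map (pvG cap r) ++ rest.map (fun p => (p.1, p.2.drop r))⟩,
               accE ++ ((done ++ [p]).filter (fun p => !decide (r < pvQ cap p))).map Prod.fst) := by
            unfold pvStepA
            simp only [hlook, hc0]
            rw [if_pos ⟨hcap.1, by exact_mod_cast hcap.2⟩]
            simp [List.filter_append, hnr, hgp]
          rw [hstep]
          have hq2 : ∀ b ∈ (done ++ [p]) ++ rest, max r 1 ≤ pvQ cap b := by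
            intro b hb; apply hq; simpa [List.append_assoc] using hb
          have hres := ih (done ++ [p]) accE (by simpa [List.append_assoc] using hnd') hq2
            (fun b hb => hacc b (List.mem_cons_of_mem _ hb))
          simpa [List.append_assoc] using hres
        · -- pick items.pop(0)
          have hr : r < pvQ cap p := by
            unfold pvQ
            split
            · omega
            · rename_i hcap0
              push Not at hcap
              have := hcap (by omega)
              omega
          have hgp : pvG cap r p = (p.1, rest2) := by
            unfold pvG; rw [if_pos hr, hrest2]
          have hcont : ((⟨done.map (pvG cap r) ++ (p.1, x :: rest2) :: rest.map (fun p => (p.1, p.2.drop r))⟩ : PySem.Dict String (List String))).contains p.1 = true := by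
            simp [PySem.Dict.contains]
          have hins : ((⟨done.map (pvG cap r) ++ (p.1, x :: rest2) :: rest.map (fun p => (p.1, p.2.drop r))⟩ : PySem.Dict String (List String))).insert p.1 rest2 =
              (⟨(done ++ [p]).map (pvG cap r) ++ rest.map (fun p => (p.1, p.2.drop r))⟩ : PySem.Dict String (List String)) := by
            apply PySem.Dict.ext
            show (if _ = true then _ else _ : PySem.Dict String (List String)).items = _
            rw [if_pos hcont]
            show List.map _ _ = _
            rw [List.map_append, List.map_cons]
            have h2 : (done.map (pvG cap r)).map (fun z => if z.1 == p.1 then (p.1, rest2) else z)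
                = done.map (pvG cap r) := by
              rw [List.map_map]
              apply List.map_congr_left
              intro b hb
              simp [Function.comp, pvG_fst, hp_done b hb]
            have h3 : (rest.map (fun p => (p.1, p.2.drop r))).map (fun z => if z.1 == p.1 then (p.1, rest2) else z)
                = rest.map (fun p => (p.1, p.2.drop r)) := by
              rw [List.map_map]
              apply List.map_congr_left
              intro b hb
              have : b.1 ≠ p.1 := by
                intro e; exact hp_rest (e ▸ List.mem_map_of_mem hb)
              simp [Function.comp, this]
            rw [h2, h3]
            simp [List.append_assoc, hgp]
          have hstep : pvStepA cap
              (acc0 ++ (done.filter (fun p => decide (r < pvQ cap p))).map (fun p => (p.1, p.2.getD r "")),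
               ⟨done.map (pvG cap r) ++ (p.1, x :: rest2) :: rest.map (fun p => (p.1, p.2.drop r))⟩,
               accE ++ (done.filter (fun p => !decide (r < pvQ cap p))).map Prod.fst) p.1 =
              (acc0 ++ ((done ++ [p]).filter (fun p => decide (r < pvQ cap p))).map (fun p => (p.1, p.2.getD r "")),
               ⟨(done ++ [p]).map (pvG cap r) ++ rest.map (fun p => (p.1, p.2.drop r))⟩,
               accE ++ ((done ++ [p]).filter (fun p => !decide (r < pvQ cap p))).map Prod.fst) := by
            unfold pvStepA
            simp only [hlook, hc0]
            rw [if_neg (by intro h; exact hcap ⟨h.1, by exact_mod_cast h.2⟩)]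
            rw [hins]
            simp [List.filter_append, hr]
            rw [← List.getD_eq_getElem?_getD, hx]
          rw [hstep]
          have hq2 : ∀ b ∈ (done ++ [p]) ++ rest, max r 1 ≤ pvQ cap b := by
            intro b hb; apply hq; simpa [List.append_assoc] using hb
          have hres := ih (done ++ [p]) accE (by simpa [List.append_assoc] using hnd') hq2
            (fun b hb => hacc b (List.mem_cons_of_mem _ hb))
          simpa [List.append_assoc] using hres

lemma pvLoopA_eq (cap : Int) (Q : List (String × List String)) (hnd : (Q.map Prod.fst).Nodup) :
    ∀ (fuel : Nat) (r : Nat) (acc : List (String × String)),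
    pvR cap Q + 1 ≤ fuel + r →
    (∀ p ∈ Q, max r 1 ≤ pvQ cap p → acc.countP (fun z => z.1 == p.1) = r) →
    pvLoopA cap fuel acc (pvPools cap Q r) =
      acc ++ (List.range' r (pvR cap Q - r)).flatMap (pvRow cap Q) := by
  intro fuel
  induction fuel with
  | zero =>
      intro r acc hfuel _
      have : pvR cap Q - r = 0 := by omega
      rw [this]
      simp [pvLoopA]
  | succ fuel ih =>
      intro r acc hfuel hacc
      show (if (pvPools cap Q r).items.isEmpty then acc else _) = _
      by_cases hemp : (pvPools cap Q r).items.isEmpty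
      · rw [if_pos hemp]
        have hF : Q.filter (fun p => decide (max r 1 ≤ pvQ cap p)) = [] := by
          have := hemp
          unfold pvPools at this
          simpa using this
        have hall : ∀ p ∈ Q, pvQ cap p < max r 1 := by
          intro p hp
          by_contra hge
          have : p ∈ Q.filter (fun p => decide (max r 1 ≤ pvQ cap p)) :=
            List.mem_filter.2 ⟨hp, by simpa using Nat.le_of_not_lt hge⟩
          rw [hF] at this; cases this
        have : (List.range' r (pvR cap Q - r)).flatMap (pvRow cap Q) = [] := by
          rw [List.flatMap_eq_nil_iff]
          intro r' hr'
          have hrr : r ≤ r' := (List.mem_range'_1.1 hr').1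
          unfold pvRow
          have : Q.filter (fun p => decide (r' < pvQ cap p)) = [] := by
            rw [List.filter_eq_nil_iff]
            intro p hp
            have := hall p hp
            simp
            omega
          rw [this]; rfl
        rw [this, List.append_nil]
      · rw [if_neg hemp]
        -- the inner for-loop over the keys snapshot
        have hkeys : (pvPools cap Q r).keys
            = (Q.filter (fun p => decide (max r 1 ≤ pvQ cap p))).map Prod.fst := by
          unfold pvPools PySem.Dict.keys
          rw [List.map_map]; rfl
        have hndF : ((Q.filter (fun p => decide (max r 1 ≤ pvQ cap p))).map Prod.fst).Nodup :=
          ((List.filter_sublist (l := Q)).map Prod.fst).nodup hnd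
        have hround := pvFoldStep cap r acc
          (Q.filter (fun p => decide (max r 1 ≤ pvQ cap p))) [] []
          (by simpa using hndF)
          (by
            intro p hp
            rw [List.nil_append] at hp
            have := (List.mem_filter.1 hp).2
            simpa using this)
          (by
            intro p hp
            exact hacc p (List.mem_filter.1 hp).1 (by simpa using (List.mem_filter.1 hp).2))
        rw [hkeys]
        show pvLoopA cap fuel _ _ = _
        rw [show (acc, pvPools cap Q r, ([] : List String))
              = (acc ++ (([] : List (String × List String)).filter (fun p => decide (r < pvQ cap p))).map (fun p => (p.1, p.2.getD r "")),
                 (⟨([] : List (String × List String)).map (pvG cap r) ++ (Q.filter (fun p => decide (max r 1 ≤ pvQ cap p))).map (fun p => (p.1, p.2.drop r))⟩ : PySem.Dict String (List String)),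
                 ([] : List String) ++ (([] : List (String × List String)).filter (fun p => !decide (r < pvQ cap p))).map Prod.fst)
            from by simp [pvPools]]
        rw [hround]
        simp only [List.nil_append]
        -- picked gained exactly round r's row
        have hrow : ((Q.filter (fun p => decide (max r 1 ≤ pvQ cap p))).filter
              (fun p => decide (r < pvQ cap p))).map (fun p => (p.1, p.2.getD r ""))
            = pvRow cap Q r := by
          unfold pvRow
          rw [List.filter_filter]
          congr 1
          apply List.filter_congr
          intro p _
          by_cases h : r < pvQ cap p
          · simp [h]; omega
          · simp [h]
        -- the pool dict advances to round r+1
        have hpools : (((Q.filter (fun p => decide (max r 1 ≤ pvQ cap p))).filter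
              (fun p => !decide (r < pvQ cap p))).map Prod.fst).foldl (fun d s => d.erase s)
              (⟨(Q.filter (fun p => decide (max r 1 ≤ pvQ cap p))).map (pvG cap r)⟩ : PySem.Dict String (List String))
            = pvPools cap Q (r+1) := by
          rw [pvEraseFoldD]
          unfold pvPools
          apply PySem.Dict.ext
          show (((Q.filter _).map (pvG cap r)).filter _) = _
          rw [List.filter_map]
          have hmemE : ∀ p ∈ Q.filter (fun p => decide (max r 1 ≤ pvQ cap p)),
              ((!(((Q.filter (fun p => decide (max r 1 ≤ pvQ cap p))).filter
                  (fun p => !decide (r < pvQ cap p))).map Prod.fst).contains (pvG cap r p).1) : Bool)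
                = decide (r < pvQ cap p) := by
            intro p hp
            rw [pvG_fst]
            by_cases h : r < pvQ cap p
            · simp only [h, decide_true, Bool.not_eq_true']
              rw [List.contains_eq_any_beq]
              rw [List.any_eq_false]
              intro a ha
              rcases List.mem_map.1 ha with ⟨b, hb, rfl⟩
              have hbF := List.mem_filter.1 hb
              have hbne : b ≠ p := by
                intro e
                rw [e] at hbF
                simp [h] at hbF
              have : b.1 ≠ p.1 := by
                intro e
                exact hbne (List.inj_on_of_nodup_map hndF hbF.1 hp e)
              simpa using Ne.symm this
            · simp only [h, decide_false, Bool.not_eq_false']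
              rw [List.contains_eq_any_beq, List.any_eq_true]
              exact ⟨p.1, List.mem_map_of_mem (List.mem_filter.2 ⟨hp, by simpa using h⟩), by simp⟩
          rw [List.filter_congr (fun p hp => by rw [Function.comp_apply, hmemE p hp])]
          rw [List.filter_filter]
          have : ∀ p : String × List String,
              (decide (r < pvQ cap p) && decide (max r 1 ≤ pvQ cap p)) = decide (max (r+1) 1 ≤ pvQ cap p) := by
            intro p
            by_cases h : r < pvQ cap p
            · simp [h]; omega
            · simp [h]
          rw [List.filter_congr (fun p _ => this p)]
          apply List.map_congr_left
          intro p hp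
          have := (List.mem_filter.1 hp).2
          unfold pvG
          rw [if_pos (by simp at this; omega)]
        rw [hrow, hpools]
        -- r ≤ pvR since the pool is nonempty
        have hrR : r ≤ pvR cap Q := by
          have hFne : Q.filter (fun p => decide (max r 1 ≤ pvQ cap p)) ≠ [] := by
            intro h
            apply hemp
            unfold pvPools
            rw [h]
            rfl
          rcases List.exists_mem_of_ne_nil _ hFne with ⟨p, hp⟩
          have h1 := (List.mem_filter.1 hp).2
          have h2 := pvQ_le_R cap (List.mem_filter.1 hp).1
          simp at h1
          omega
        have hacc' : ∀ p ∈ Q, max (r+1) 1 ≤ pvQ cap p →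
            (acc ++ pvRow cap Q r).countP (fun z => z.1 == p.1) = r + 1 := by
          intro p hp hq1
          rw [List.countP_append, hacc p hp (by omega), pvCount_row cap hnd hp r (by omega)]
        have hres := ih (r+1) (acc ++ pvRow cap Q r) (by omega) hacc'
        rw [hres, List.append_assoc]
        congr 1
        rcases Nat.lt_or_ge r (pvR cap Q) with hlt | hge
        · have : pvR cap Q - r = (pvR cap Q - (r+1)) + 1 := by omega
          rw [this, List.range'_succ, List.flatMap_cons]
        · have hre : r = pvR cap Q := by omega
          have h0 : pvR cap Q - r = 0 := by omega
          have h1 : pvR cap Q - (r+1) = 0 := by omega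
          rw [h0, h1]
          have hrowR : pvRow cap Q r = [] := by
            unfold pvRow
            rw [List.filter_eq_nil_iff.2, List.map_nil]
            intro p hp
            have := pvQ_le_R cap hp
            simp
            omega
          rw [hrowR]
          rfl

lemma pvQInt (cap : Int) (p : String × List String) :
    (if cap ≤ 0 then ((p.2.length : Int)) else min (p.2.length : Int) cap) = (pvQ cap p : Int) := by
  unfold pvQ
  split <;> omega

lemma pvMaxFold (cap : Int) (Q : List (String × List String)) :
    ∀ m : Nat,
    Q.foldl (fun m p => if (if cap ≤ 0 then ((p.2.length : Int)) else min (p.2.length : Int) cap) > m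
        then (if cap ≤ 0 then ((p.2.length : Int)) else min (p.2.length : Int) cap) else m) (m : Int)
      = (((Q.map (pvQ cap)).foldl max m : Nat) : Int) := by
  induction Q with
  | nil => intro m; simp
  | cons p Q ih =>
      intro m
      simp only [List.foldl_cons, List.map_cons]
      rw [show (if (if cap ≤ 0 then ((p.2.length : Int)) else min (p.2.length : Int) cap) > (m : Int)
          then (if cap ≤ 0 then ((p.2.length : Int)) else min (p.2.length : Int) cap) else (m : Int))
          = ((max m (pvQ cap p) : Nat) : Int) from by rw [pvQInt]; omega]
      exact ih (max m (pvQ cap p))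

lemma pvInner (cap : Int) (Q : List (String × List String)) (r : Nat) (picked : List (String × String)) :
    (Q.map (fun p => (p.1, p.2, if cap ≤ 0 then ((p.2.length : Int)) else min (p.2.length : Int) cap))).foldl
      (fun picked t => if (r : Int) < t.2.2 then picked ++ [(t.1, PySem.List.pyGetD t.2.1 (r : Int) "")] else picked) picked
      = picked ++ pvRow cap Q r := by
  rw [List.foldl_map]
  have h1 : (fun (picked : List (String × String)) (p : String × List String) =>
        if (r : Int) < (if cap ≤ 0 then ((p.2.length : Int)) else min (p.2.length : Int) cap)
        then picked ++ [(p.1, PySem.List.pyGetD p.2 (r : Int) "")] else picked)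
      = (fun picked p => if (decide (r < pvQ cap p)) = true
        then picked ++ [(p.1, p.2.getD r "")] else picked) := by
    funext picked p
    rw [pvQInt]
    by_cases h : r < pvQ cap p
    · rw [if_pos (by exact_mod_cast h), if_pos (by simpa using h)]
      simp
    · rw [if_neg (by exact_mod_cast h), if_neg (by simpa using h)]
  rw [h1, PySem.List.foldl_append_if]
  rfl

lemma pvAlt_eq (by_speaker : List (String × List String)) (cap : Int) :
    round_robin_select_alt by_speaker cap =
      (List.range (pvR cap (PySem.Dict.ofList by_speaker).items)).flatMap
        (pvRow cap (PySem.Dict.ofList by_speaker).items) := by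
  have hst : ((PySem.Dict.ofList by_speaker).items.foldl
      (fun (acc : List (String × List String × Int) × Int) p =>
        let n : Int := p.2.length
        let q : Int := if cap ≤ 0 then n else min n cap
        (acc.1 ++ [(p.1, p.2, q)], if q > acc.2 then q else acc.2)) ([], 0))
      = ((PySem.Dict.ofList by_speaker).items.map
          (fun p => (p.1, p.2, if cap ≤ 0 then ((p.2.length : Int)) else min (p.2.length : Int) cap)),
         ((pvR cap (PySem.Dict.ofList by_speaker).items : Nat) : Int)) := by
    show ((PySem.Dict.ofList by_speaker).items.foldl
      (fun (acc : List (String × List String × Int) × Int) p =>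
        ((acc.1 ++ [(p.1, p.2, if cap ≤ 0 then ((p.2.length : Int)) else min (p.2.length : Int) cap)]),
         if (if cap ≤ 0 then ((p.2.length : Int)) else min (p.2.length : Int) cap) > acc.2
         then (if cap ≤ 0 then ((p.2.length : Int)) else min (p.2.length : Int) cap) else acc.2)) ([], 0)) = _
    rw [PySem.List.foldl_prod_mk
      (fun (s : List (String × List String × Int)) (p : String × List String) =>
        s ++ [(p.1, p.2, if cap ≤ 0 then ((p.2.length : Int)) else min (p.2.length : Int) cap)])
      (fun (s : Int) (p : String × List String) =>
        if (if cap ≤ 0 then ((p.2.length : Int)) else min (p.2.length : Int) cap) > s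
        then (if cap ≤ 0 then ((p.2.length : Int)) else min (p.2.length : Int) cap) else s)
      (PySem.Dict.ofList by_speaker).items [] 0]
    rw [Prod.mk.injEq]
    constructor
    · rw [PySem.List.foldl_append_singleton_eq_map]
      rfl
    · simpa using pvMaxFold cap (PySem.Dict.ofList by_speaker).items 0
  unfold round_robin_select_alt
  rw [hst]
  show (PySem.List.pyRange 0 ((pvR cap (PySem.Dict.ofList by_speaker).items : Nat) : Int) 1).foldl
      (fun picked r => ((PySem.Dict.ofList by_speaker).items.map
          (fun p => (p.1, p.2, if cap ≤ 0 then ((p.2.length : Int)) else min (p.2.length : Int) cap))).foldl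
        (fun picked t => if r < t.2.2 then picked ++ [(t.1, PySem.List.pyGetD t.2.1 r "")] else picked) picked) []
      = _
  rw [PySem.List.pyRange_zero_nat, List.foldl_map]
  simp only [pvInner]
  rw [PySem.List.foldl_append_eq_flatMap]
  rfl

lemma pvFoldSum (L : List (String × List String)) :
    ∀ init : Nat, L.foldl (fun n p => n + p.2.length) init = init + (L.map (fun p => p.2.length)).sum := by
  induction L with
  | nil => intro init; simp
  | cons p L ih => intro init; simp [ih, Nat.add_assoc]

lemma pvFoldlMaxMem (l : List Nat) : ∀ a : Nat, l.foldl max a = a ∨ l.foldl max a ∈ l := by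
  induction l with
  | nil => intro a; left; rfl
  | cons x l ih =>
      intro a
      rw [List.foldl_cons]
      rcases ih (max a x) with h | h
      · rcases max_choice a x with h2 | h2 <;> rw [h, h2]
        · left; rfl
        · right; simp
      · right; simp [h]

lemma pvR_attained (cap : Int) (Q : List (String × List String)) (h : pvR cap Q ≠ 0) :
    ∃ p ∈ Q, pvQ cap p = pvR cap Q := by
  rcases pvFoldlMaxMem (Q.map (pvQ cap)) 0 with h0 | h0
  · exact absurd h0 h
  · rcases List.mem_map.1 h0 with ⟨p, hp, he⟩
    exact ⟨p, hp, he⟩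

lemma pvFuelBig (cap : Int) (Q : List (String × List String)) :
    pvR cap Q + 1 ≤
      ((Q.filter (fun p => decide (max 0 1 ≤ pvQ cap p))).map (fun p => (p.1, p.2.drop 0))).foldl
          (fun n p => n + p.2.length) 0
        + ((Q.filter (fun p => decide (max 0 1 ≤ pvQ cap p))).map (fun p => (p.1, p.2.drop 0))).length + 1 := by
  rw [pvFoldSum]
  rcases Nat.eq_zero_or_pos (pvR cap Q) with h0 | hpos
  · omega
  · rcases pvR_attained cap Q (by omega) with ⟨p, hp, he⟩
    have hmem : p ∈ Q.filter (fun p => decide (max 0 1 ≤ pvQ cap p)) :=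
      List.mem_filter.2 ⟨hp, by simp; omega⟩
    have hlen : p.2.length ∈ (((Q.filter (fun p => decide (max 0 1 ≤ pvQ cap p))).map (fun p => (p.1, p.2.drop 0))).map (fun p => p.2.length)) := by
      rw [List.map_map]
      refine List.mem_map.2 ⟨p, hmem, by simp⟩
    have hsum := List.single_le_sum (l := (((Q.filter (fun p => decide (max 0 1 ≤ pvQ cap p))).map (fun p => (p.1, p.2.drop 0))).map (fun p => p.2.length))) (by intro x _; omega) _ hlen
    have hq := pvQ_le cap p
    have hlp : 0 < ((Q.filter (fun p => decide (max 0 1 ≤ pvQ cap p))).map (fun p => (p.1, p.2.drop 0))).length := by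
      rw [List.length_map]
      exact List.length_pos_of_mem hmem
    omega

-- ===== VERDICT (by name: the statement is the Claim_ definition above) =====
theorem round_robin_select_spec : Claim_equal_round_robin_select := by
  intro by_speaker cap _
  unfold Spec_round_robin_select
  rw [pvAlt_eq]
  have hnd : ((PySem.Dict.ofList by_speaker).items.map Prod.fst).Nodup :=
    PySem.Dict.nodup_keys_ofList by_speaker
  have hinit := pvPoolsInit cap (PySem.Dict.ofList by_speaker).items hnd
  show pvLoopA cap
      ((PySem.Dict.ofList ((PySem.Dict.ofList by_speaker).items.filter (fun p => !p.2.isEmpty))).items.foldl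
          (fun n p => n + p.2.length) 0
        + (PySem.Dict.ofList ((PySem.Dict.ofList by_speaker).items.filter (fun p => !p.2.isEmpty))).size + 1)
      []
      (PySem.Dict.ofList ((PySem.Dict.ofList by_speaker).items.filter (fun p => !p.2.isEmpty))) = _
  rw [hinit]
  have hfuel : pvR cap (PySem.Dict.ofList by_speaker).items + 1 ≤
      ((pvPools cap (PySem.Dict.ofList by_speaker).items 0).items.foldl (fun n p => n + p.2.length) 0
        + (pvPools cap (PySem.Dict.ofList by_speaker).items 0).size + 1) + 0 := by
    rw [Nat.add_zero]
    exact pvFuelBig cap (PySem.Dict.ofList by_speaker).items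
  have hmain := pvLoopA_eq cap (PySem.Dict.ofList by_speaker).items hnd
    ((pvPools cap (PySem.Dict.ofList by_speaker).items 0).items.foldl (fun n p => n + p.2.length) 0
      + (pvPools cap (PySem.Dict.ofList by_speaker).items 0).size + 1) 0 []
    hfuel (by intro p _ _; simp)
  rw [hmain]
  simp [List.range_eq_range']
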